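-- pv_equiv track=rewrite | github.com/Noettore/AdventOfCode | 2020-python/solutions/day_07.py | part1
-- ===== SOURCE A (Python) =====
-- import collections
--
-- def part1(reverse_graph: dict, color: str) -> int:
--     """part1 solver take a dict of lists and return an int"""
--     queue = collections.deque(reverse_graph[color])
--     already_counted = set()
--     while queue:
--         container = queue.popleft()
--         if container not in already_counted:
--             already_counted.add(container)
--             if container in reverse_graph.keys():
--                 queue += collections.deque(reverse_graph[container])
--     return len(already_counted)
-- ===== SOURCE B (Python) =====
-- def part1(reverse_graph: dict, color: str) -> int:
--     """part1 solver take a dict of lists and return an int"""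
--     visited = set(reverse_graph[color])
--     while True:
--         expanded = visited | {n for c in visited for n in reverse_graph.get(c, ())}
--         if expanded == visited:
--             return len(visited)
--         visited = expanded
-- ===== Notes on version B (the rewrite author's own statement) =====
-- stated objective: alternative
-- what changed: Replaces the explicit deque-based BFS worklist with a round-based fixpoint iteration: repeatedly expand the visited set by one whole level of reverse edges until it stabilises, then return its size.
import Mathlib
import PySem

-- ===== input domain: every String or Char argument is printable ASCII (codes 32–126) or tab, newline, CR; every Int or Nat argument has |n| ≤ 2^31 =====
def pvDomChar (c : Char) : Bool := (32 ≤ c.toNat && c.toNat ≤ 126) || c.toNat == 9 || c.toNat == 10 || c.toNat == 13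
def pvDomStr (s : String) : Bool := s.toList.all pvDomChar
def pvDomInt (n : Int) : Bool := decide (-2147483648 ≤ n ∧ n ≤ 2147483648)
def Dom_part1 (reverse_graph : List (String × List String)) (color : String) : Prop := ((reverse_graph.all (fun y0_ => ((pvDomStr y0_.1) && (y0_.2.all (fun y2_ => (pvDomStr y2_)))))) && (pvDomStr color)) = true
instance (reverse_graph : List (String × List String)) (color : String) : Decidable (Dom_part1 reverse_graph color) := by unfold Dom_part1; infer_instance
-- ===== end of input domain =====

-- Program equivalence: A's deque-based BFS over the reverse graph vs B's round-based
-- fixpoint iteration (expand the visited set by one whole level until stable); alternative decomposition, same result.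


-- ===== PORT A =====
-- dict lookup 'reverse_graph[c]' (first match in the association list; none = KeyError)
def pvAdj? (g : List (String × List String)) (c : String) : Option (List String) :=
  PySem.Dict.get? (PySem.Dict.mk g) c

-- 'reverse_graph[c] if c in reverse_graph.keys() else []' — what a key-guarded lookup appends
def pvAdjD (g : List (String × List String)) (c : String) : List String :=
  (pvAdj? g c).getD []

-- all strings occurring in the dict's value lists (used only for the termination measures)
def pvU (g : List (String × List String)) : List String := g.flatMap (·.2)

-- termination measure: how many candidate nodes (from `extra` and the value lists) are not yet in `seen`
def pvMeasure (g : List (String × List String)) (seen : PySem.Set String) (extra : List String) : Nat :=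
  ((extra ++ pvU g).toFinset.filter (fun x => x ∉ seen)).card

lemma pvAdjD_subset_U (g : List (String × List String)) (c : String) :
    ∀ x ∈ pvAdjD g c, x ∈ pvU g := by
  induction g with
  | nil => simp [pvAdjD, pvAdj?, PySem.Dict.get?]
  | cons p rest ih =>
    intro x hx
    have hstep : x ∈ p.2 ∨ x ∈ pvU rest := by
      by_cases hc : p.1 == c
      · left
        have : pvAdjD (p :: rest) c = p.2 := by
          simp [pvAdjD, pvAdj?, PySem.Dict.get?, List.find?, hc]
        exact this ▸ hx
      · right
        apply ih x
        have : pvAdjD (p :: rest) c = pvAdjD rest c := by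
          simp [pvAdjD, pvAdj?, PySem.Dict.get?, List.find?, hc]
        exact this ▸ hx
    simpa [pvU, List.flatMap_cons] using hstep

lemma pvMeasure_le (g : List (String × List String)) (seen : PySem.Set String)
    (c : String) (rest : List String) :
    pvMeasure g seen rest ≤ pvMeasure g seen (c :: rest) := by
  apply Finset.card_le_card
  intro x hx
  simp only [Finset.mem_filter, List.mem_toFinset, List.mem_append, List.mem_cons] at hx ⊢
  tauto

lemma pvMeasure_decr (g : List (String × List String)) (seen : PySem.Set String)
    (c : String) (rest ns : List String) (hns : ∀ x ∈ ns, x ∈ pvU g) (hc : c ∉ seen) :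
    pvMeasure g (PySem.Set.add seen c) (rest ++ ns) < pvMeasure g seen (c :: rest) := by
  apply Finset.card_lt_card
  constructor
  · intro x hx
    simp only [Finset.mem_filter, List.mem_toFinset, List.mem_append, List.mem_cons] at hx ⊢
    obtain ⟨hmem, hnot⟩ := hx
    rw [PySem.Set.mem_add] at hnot
    refine ⟨?_, fun h => hnot (Or.inl h)⟩
    rcases hmem with (h | h) | h
    · tauto
    · exact Or.inr (hns x h)
    · tauto
  · intro hsub
    have := hsub (a := c) (by
      have hcmem : c ∈ (c :: rest) ++ pvU g := by simp
      simp only [Finset.mem_filter, List.mem_toFinset]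
      exact ⟨hcmem, hc⟩)
    simp only [Finset.mem_filter] at this
    exact this.2 (by rw [PySem.Set.mem_add]; exact Or.inr rfl)

-- the BFS loop of A: pop the head of the queue, count it if new, append its reverse
-- neighbours if it is a key (appending nothing when it is not)
def part1Loop (g : List (String × List String)) (queue : List String)
    (seen : PySem.Set String) : PySem.Set String :=
  match queue with
  | [] => seen
  | c :: rest =>
    if hseen : PySem.Set.contains seen c then part1Loop g rest seen
    else part1Loop g (rest ++ pvAdjD g c) (PySem.Set.add seen c)
termination_by (pvMeasure g seen queue, queue.length)
decreasing_by
  · rcases lt_or_eq_of_le (pvMeasure_le g seen c rest) with hlt | heq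
    · exact Prod.Lex.left _ _ hlt
    · rw [heq]; exact Prod.Lex.right _ (Nat.lt_succ_self _)
  · exact Prod.Lex.left _ _ (pvMeasure_decr g seen c rest (pvAdjD g c) (pvAdjD_subset_U g c)
      (fun hm => hseen ((PySem.Set.contains_iff seen c).mpr hm)))

def part1 (reverse_graph : List (String × List String)) (color : String) : Int :=
  PySem.Set.len (part1Loop reverse_graph ((pvAdj? reverse_graph color).getD []) PySem.Set.empty)

-- ===== PORT B =====
lemma pvMeasureB_decr (g : List (String × List String)) (visited : PySem.Set String)
    (hne : PySem.Set.equal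
      (PySem.Set.union visited (visited.flatMap (fun c => pvAdjD g c))) visited = false) :
    pvMeasure g (PySem.Set.union visited (visited.flatMap (fun c => pvAdjD g c))) [] <
      pvMeasure g visited [] := by
  set expanded := PySem.Set.union visited (visited.flatMap (fun c => pvAdjD g c)) with hexp
  have hsub : ∀ x, x ∈ visited → x ∈ expanded := fun x hx => by
    rw [hexp, PySem.Set.mem_union]; exact Or.inl hx
  have hwit : ∃ x, x ∈ expanded ∧ x ∉ visited := by
    by_contra hno
    push_neg at hno
    have : PySem.Set.equal expanded visited = true := by
      rw [PySem.Set.equal_iff]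
      exact fun x => ⟨hno x, hsub x⟩
    rw [this] at hne; cases hne
  obtain ⟨x, hxe, hxv⟩ := hwit
  have hxU : x ∈ pvU g := by
    rw [hexp, PySem.Set.mem_union] at hxe
    rcases hxe with h | h
    · exact absurd h hxv
    · obtain ⟨c, _, hx⟩ := List.mem_flatMap.mp h
      exact pvAdjD_subset_U g c x hx
  apply Finset.card_lt_card
  constructor
  · intro y hy
    simp only [Finset.mem_filter, List.mem_toFinset, List.nil_append] at hy ⊢
    exact ⟨hy.1, fun hv => hy.2 (hsub y hv)⟩
  · intro hcon
    have := hcon (a := x) (by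
      simp only [Finset.mem_filter, List.mem_toFinset, List.nil_append]
      exact ⟨hxU, hxv⟩)
    simp only [Finset.mem_filter] at this
    exact this.2 hxe

-- the fixpoint loop of B: add one whole level of reverse neighbours; stop when nothing new
def part1AltLoop (g : List (String × List String)) (visited : PySem.Set String) : PySem.Set String :=
  if h : PySem.Set.equal
      (PySem.Set.union visited (visited.flatMap (fun c => pvAdjD g c))) visited then visited
  else part1AltLoop g (PySem.Set.union visited (visited.flatMap (fun c => pvAdjD g c)))
termination_by pvMeasure g visited []
decreasing_by
  have h' := pvMeasureB_decr g visited (eq_false_of_ne_true h)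
  simpa using h'

def part1_alt (reverse_graph : List (String × List String)) (color : String) : Int :=
  PySem.Set.len (part1AltLoop reverse_graph (PySem.Set.ofList ((pvAdj? reverse_graph color).getD [])))

-- ===== PRECONDITION & SPEC =====
-- Pre_ excludes exactly the inputs where `color` is not a key of the dict: there both A and B raise KeyError.
def Pre_part1 (reverse_graph : List (String × List String)) (color : String) : Prop :=
  color ∈ reverse_graph.map Prod.fst
instance (reverse_graph : List (String × List String)) (color : String) : Decidable (Pre_part1 reverse_graph color) := by unfold Pre_part1; infer_instance

def pvWitness_part1 : (List (String × List String)) × String := ([("a", ["b"])], "a")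

def Spec_part1 (reverse_graph : List (String × List String)) (color : String) (out : Int) : Prop := out = part1_alt reverse_graph color
instance (reverse_graph : List (String × List String)) (color : String) (out : Int) : Decidable (Spec_part1 reverse_graph color out) := by unfold Spec_part1; infer_instance

-- ===== CLAIM (what is proved, stated in full; the proofs are below) =====
def Claim_equal_part1 : Prop := ∀ (reverse_graph : List (String × List String)) (color : String), Dom_part1 reverse_graph color → Pre_part1 reverse_graph color → Spec_part1 reverse_graph color (part1 reverse_graph color)

-- ===== LEMMAS AND PROOFS =====

-- the nodes reachable from `start` along reverse edges: what both loops compute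
inductive pvReach (g : List (String × List String)) (start : List String) : String → Prop
  | base (x : String) : x ∈ start → pvReach g start x
  | step (x y : String) : pvReach g start x → y ∈ pvAdjD g x → pvReach g start y

-- ---- A's loop ----
lemma part1Loop_nodup (g : List (String × List String)) (queue : List String)
    (seen : PySem.Set String) (h : List.Nodup seen) : List.Nodup (part1Loop g queue seen) := by
  induction queue, seen using part1Loop.induct g with
  | case1 seen => simpa [part1Loop]
  | case2 seen c rest hc ih => rw [part1Loop, dif_pos hc]; exact ih h
  | case3 seen c rest hc ih =>
    rw [part1Loop, dif_neg hc]
    exact ih (PySem.Set.nodup_add seen c h)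

lemma part1Loop_mono (g : List (String × List String)) (queue : List String)
    (seen : PySem.Set String) (x : String) (h : x ∈ seen) : x ∈ part1Loop g queue seen := by
  induction queue, seen using part1Loop.induct g with
  | case1 seen => simpa [part1Loop]
  | case2 seen c rest hc ih => rw [part1Loop, dif_pos hc]; exact ih h
  | case3 seen c rest hc ih =>
    rw [part1Loop, dif_neg hc]
    exact ih ((PySem.Set.mem_add seen c x).mpr (Or.inl h))

lemma part1Loop_mem_queue (g : List (String × List String)) (queue : List String)
    (seen : PySem.Set String) (x : String) (h : x ∈ queue) : x ∈ part1Loop g queue seen := by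
  induction queue, seen using part1Loop.induct g with
  | case1 seen => simp at h
  | case2 seen c rest hc ih =>
    rw [part1Loop, dif_pos hc]
    rcases List.mem_cons.mp h with rfl | h
    · exact part1Loop_mono _ _ _ _ ((PySem.Set.contains_iff seen x).mp hc)
    · exact ih h
  | case3 seen c rest hc ih =>
    rw [part1Loop, dif_neg hc]
    rcases List.mem_cons.mp h with rfl | h
    · exact part1Loop_mono _ _ _ _ ((PySem.Set.mem_add seen x x).mpr (Or.inr rfl))
    · exact ih (List.mem_append_left _ h)

lemma part1Loop_closed (g : List (String × List String)) (queue : List String)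
    (seen : PySem.Set String)
    (h : ∀ v ∈ seen, ∀ y ∈ pvAdjD g v, y ∈ seen ∨ y ∈ queue) :
    ∀ v ∈ part1Loop g queue seen, ∀ y ∈ pvAdjD g v, y ∈ part1Loop g queue seen := by
  induction queue, seen using part1Loop.induct g with
  | case1 seen =>
    intro v hv y hy
    rw [part1Loop] at hv ⊢
    rcases h v hv y hy with h' | h'
    · exact h'
    · simp at h'
  | case2 seen c rest hc ih =>
    rw [part1Loop, dif_pos hc]
    apply ih
    intro v hv y hy
    rcases h v hv y hy with h' | h'
    · exact Or.inl h'
    · rcases List.mem_cons.mp h' with rfl | h''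
      · exact Or.inl ((PySem.Set.contains_iff seen y).mp hc)
      · exact Or.inr h''
  | case3 seen c rest hc ih =>
    rw [part1Loop, dif_neg hc]
    apply ih
    intro v hv y hy
    rcases (PySem.Set.mem_add seen c v).mp hv with hv' | rfl
    · rcases h v hv' y hy with h' | h'
      · exact Or.inl ((PySem.Set.mem_add seen c y).mpr (Or.inl h'))
      · rcases List.mem_cons.mp h' with rfl | h''
        · exact Or.inl ((PySem.Set.mem_add seen y y).mpr (Or.inr rfl))
        · exact Or.inr (List.mem_append_left _ h'')
    · exact Or.inr (List.mem_append_right _ hy)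

lemma part1Loop_sound (g : List (String × List String)) (queue : List String)
    (seen : PySem.Set String) (R : String → Prop)
    (hstep : ∀ x y, R x → y ∈ pvAdjD g x → R y)
    (hseen : ∀ v ∈ seen, R v) (hqueue : ∀ q ∈ queue, R q) :
    ∀ x ∈ part1Loop g queue seen, R x := by
  induction queue, seen using part1Loop.induct g with
  | case1 seen => rw [part1Loop]; exact hseen
  | case2 seen c rest hc ih =>
    rw [part1Loop, dif_pos hc]
    exact ih hseen (fun q hq => hqueue q (List.mem_cons_of_mem _ hq))
  | case3 seen c rest hc ih =>
    rw [part1Loop, dif_neg hc]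
    have hRc : R c := hqueue c (List.mem_cons_self ..)
    apply ih
    · intro v hv
      rcases (PySem.Set.mem_add seen c v).mp hv with hv' | rfl
      · exact hseen v hv'
      · exact hRc
    · intro q hq
      rcases List.mem_append.mp hq with h' | h'
      · exact hqueue q (List.mem_cons_of_mem _ h')
      · exact hstep c q hRc h'

lemma part1Loop_mem_iff (g : List (String × List String)) (start : List String) (x : String) :
    x ∈ part1Loop g start PySem.Set.empty ↔ pvReach g start x := by
  constructor
  · apply part1Loop_sound g start PySem.Set.empty (pvReach g start)
    · exact fun a b ha hb => pvReach.step a b ha hb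
    · intro v hv; simp [PySem.Set.empty] at hv
    · exact fun q hq => pvReach.base q hq
  · intro hr
    induction hr with
    | base z hz => exact part1Loop_mem_queue g start PySem.Set.empty z hz
    | step a b _ hb ih =>
      exact part1Loop_closed g start PySem.Set.empty
        (by intro v hv; simp [PySem.Set.empty] at hv) a ih b hb

-- ---- B's loop ----
lemma part1AltLoop_nodup (g : List (String × List String)) (visited : PySem.Set String)
    (h : List.Nodup visited) : List.Nodup (part1AltLoop g visited) := by
  induction visited using part1AltLoop.induct g with
  | case1 visited heq => rw [part1AltLoop, dif_pos heq]; exact h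
  | case2 visited heq ih =>
    rw [part1AltLoop, dif_neg heq]
    simp only [List.flatMap_subtype, List.unattach_attach] at ih
    exact ih (PySem.Set.nodup_union _ _ h)

lemma part1AltLoop_mono (g : List (String × List String)) (visited : PySem.Set String)
    (x : String) (h : x ∈ visited) : x ∈ part1AltLoop g visited := by
  induction visited using part1AltLoop.induct g with
  | case1 visited heq => rw [part1AltLoop, dif_pos heq]; exact h
  | case2 visited heq ih =>
    rw [part1AltLoop, dif_neg heq]
    simp only [List.flatMap_subtype, List.unattach_attach] at ih
    exact ih ((PySem.Set.mem_union _ _ x).mpr (Or.inl h))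

lemma part1AltLoop_closed (g : List (String × List String)) (visited : PySem.Set String) :
    ∀ v ∈ part1AltLoop g visited, ∀ y ∈ pvAdjD g v, y ∈ part1AltLoop g visited := by
  induction visited using part1AltLoop.induct g with
  | case1 visited heq =>
    intro v hv y hy
    rw [part1AltLoop, dif_pos heq] at hv ⊢
    apply ((PySem.Set.equal_iff _ _).mp heq y).mp
    rw [PySem.Set.mem_union]
    exact Or.inr (List.mem_flatMap.mpr ⟨v, hv, hy⟩)
  | case2 visited heq ih =>
    intro v hv y hy
    rw [part1AltLoop, dif_neg heq] at hv ⊢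
    simp only [List.flatMap_subtype, List.unattach_attach] at ih
    exact ih v hv y hy

lemma part1AltLoop_sound (g : List (String × List String)) (visited : PySem.Set String)
    (R : String → Prop) (hstep : ∀ x y, R x → y ∈ pvAdjD g x → R y)
    (hvis : ∀ v ∈ visited, R v) : ∀ x ∈ part1AltLoop g visited, R x := by
  induction visited using part1AltLoop.induct g with
  | case1 visited heq =>
    intro x hx; rw [part1AltLoop, dif_pos heq] at hx
    exact hvis x hx
  | case2 visited heq ih =>
    intro x hx; rw [part1AltLoop, dif_neg heq] at hx
    simp only [List.flatMap_subtype, List.unattach_attach] at ih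
    apply ih _ _ hx
    intro v hv
    rcases (PySem.Set.mem_union _ _ v).mp hv with h' | h'
    · exact hvis v h'
    · obtain ⟨c, hc, hvc⟩ := List.mem_flatMap.mp h'
      exact hstep c v (hvis c hc) hvc

lemma part1AltLoop_mem_iff (g : List (String × List String)) (start : List String) (x : String) :
    x ∈ part1AltLoop g (PySem.Set.ofList start) ↔ pvReach g start x := by
  constructor
  · apply part1AltLoop_sound g _ (pvReach g start)
    · exact fun a b ha hb => pvReach.step a b ha hb
    · intro v hv; exact pvReach.base v ((PySem.Set.mem_ofList start v).mp hv)
  · intro hr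
    induction hr with
    | base z hz =>
      exact part1AltLoop_mono g _ z ((PySem.Set.mem_ofList start z).mpr hz)
    | step a b _ hb ih => exact part1AltLoop_closed g _ a ih b hb

-- ---- both sets are equal as finite sets, hence equal in size ----
lemma part1_eq_alt (g : List (String × List String)) (color : String) :
    part1 g color = part1_alt g color := by
  unfold part1 part1_alt
  rw [PySem.Set.len_eq, PySem.Set.len_eq]
  congr 1
  set start := (pvAdj? g color).getD []
  have hA := part1Loop_nodup g start PySem.Set.empty (by simp [PySem.Set.empty])
  have hB := part1AltLoop_nodup g (PySem.Set.ofList start) (PySem.Set.nodup_ofList start)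
  rw [← List.toFinset_card_of_nodup hA, ← List.toFinset_card_of_nodup hB]
  congr 1
  ext x
  rw [List.mem_toFinset, List.mem_toFinset, part1Loop_mem_iff, part1AltLoop_mem_iff]

-- ===== VERDICT (by name: the statement is the Claim_ definition above) =====
theorem part1_spec : Claim_equal_part1 := by
  intro g color _ _
  unfold Spec_part1
  exact part1_eq_alt g color
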